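-- pv_equiv track=rewrite | github.com/lucasgsfelix/Transfermarkt-Crawler | parser.py | _match_positions
-- ===== SOURCE A (Python) =====
-- def _match_positions(start_list, end_list):
--     """ Match start and end positions. """
--
--     if len(start_list) == 1:
--         value = start_list[0]
--         return {value: list(filter(lambda x: value < x, end_list))[0]}
--
--     result = {}
--     for start in start_list:
--         for end in end_list:
--             if start < end:
--                 result[start] = end
--                 break
--
--     return result
-- ===== SOURCE B (Python) =====
-- def _match_positions(start_list, end_list):
--     """Match start and end positions via prefix maxima + binary search."""
--     # prefix_max[i] = max(end_list[0..i]); it is nondecreasing, and the first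
--     # index with end_list[i] > s equals the first index with prefix_max[i] > s.
--     prefix_max = []
--     best = None
--     for e in end_list:
--         if best is None or e > best:
--             best = e
--         prefix_max.append(best)
--     m = len(prefix_max)
--     result = {}
--     for s in start_list:
--         lo, hi = 0, m
--         while lo < hi:
--             mid = (lo + hi) // 2
--             if s < prefix_max[mid]:
--                 hi = mid
--             else:
--                 lo = mid + 1
--         if lo < m:
--             result[s] = end_list[lo]
--     return result
-- ===== Notes on version B (the rewrite author's own statement) =====
-- stated objective: faster
-- what changed: B replaces A's inner linear scan of end_list per start by a precomputed prefix-maxima array with a hand-written binary search per start (the first index with end > start equals the first index with prefix-max > start), dropping A's one-element special case, which the general path already covers.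
import Mathlib
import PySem

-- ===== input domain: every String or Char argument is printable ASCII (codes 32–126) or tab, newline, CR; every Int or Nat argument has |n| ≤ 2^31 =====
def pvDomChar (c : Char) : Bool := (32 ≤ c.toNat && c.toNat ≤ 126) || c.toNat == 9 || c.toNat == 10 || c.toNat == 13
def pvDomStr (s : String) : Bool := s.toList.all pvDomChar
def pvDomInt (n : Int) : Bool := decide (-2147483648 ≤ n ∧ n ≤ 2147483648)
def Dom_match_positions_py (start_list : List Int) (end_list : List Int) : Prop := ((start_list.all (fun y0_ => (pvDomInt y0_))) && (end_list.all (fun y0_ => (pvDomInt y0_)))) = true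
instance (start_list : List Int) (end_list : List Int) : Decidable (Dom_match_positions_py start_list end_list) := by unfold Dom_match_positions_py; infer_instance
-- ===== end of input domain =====

-- B replaces A's inner linear scan over end_list by a prefix-maxima array and a binary
-- search per start (objective: faster, O((n+m) log m) instead of O(n*m)).

-- ===== PORT A =====
-- inner 'for end in end_list: if start < end: result[start] = end; break'
def innerLoopA (s : Int) : List Int → PySem.Dict Int Int → PySem.Dict Int Int
  | [], r => r
  | e :: rest, r => if s < e then r.insert s e else innerLoopA s rest r

def match_positions_py (start_list : List Int) (end_list : List Int) : List (Int × Int) :=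
  if start_list.length = 1 then
    -- value = start_list[0]  (in range: length is 1)
    let value := start_list.getD 0 0
    -- list(filter(lambda x: value < x, end_list))[0] ; none = IndexError, excluded by Pre_
    match PySem.List.pyGet? (end_list.filter (fun x => decide (value < x))) 0 with
    | some e => ((PySem.Dict.empty : PySem.Dict Int Int).insert value e).items
    | none => []
  else
    (start_list.foldl (fun r s => innerLoopA s end_list r)
      (PySem.Dict.empty : PySem.Dict Int Int)).items

-- ===== PORT B =====
-- prefix_max accumulation loop of Source B (best starts as None)
def prefMaxB : List Int → Option Int → List Int
  | [], _ => []
  | e :: rest, best =>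
    let best' := match best with
      | none => e
      | some b => if e > b then e else b
    best' :: prefMaxB rest (some best')

-- the hand-written 'while lo < hi' binary-search loop of Source B (fuel = hi - lo bounds the
-- number of iterations; it only makes the loop total and never changes the result)
def bisectGo (pm : List Int) (s : Int) : Nat → Nat → Nat → Nat
  | 0, lo, _ => lo
  | fuel + 1, lo, hi =>
    if lo < hi then
      let mid := (lo + hi) / 2
      if s < pm.getD mid 0 then bisectGo pm s fuel lo mid else bisectGo pm s fuel (mid + 1) hi
    else lo

def bisectB (pm : List Int) (s : Int) (lo hi : Nat) : Nat :=
  bisectGo pm s (hi - lo) lo hi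

def match_positions_py_alt (start_list : List Int) (end_list : List Int) : List (Int × Int) :=
  let pm := prefMaxB end_list none
  let m := pm.length
  (start_list.foldl (fun r s =>
      let lo := bisectB pm s 0 m
      if lo < m then r.insert s (end_list.getD lo 0) else r)
    (PySem.Dict.empty : PySem.Dict Int Int)).items

-- ===== PRECONDITION & SPEC =====
-- Pre_ excludes only the inputs where A raises IndexError: a one-element start_list whose
-- single start has no larger element in end_list (A indexes [0] of an empty filter there).
def Pre_match_positions_py (start_list : List Int) (end_list : List Int) : Prop :=
  start_list.length = 1 → (end_list.any (fun e => decide (start_list.getD 0 0 < e)) = true)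
instance (start_list : List Int) (end_list : List Int) : Decidable (Pre_match_positions_py start_list end_list) := by unfold Pre_match_positions_py; infer_instance

def pvWitness_match_positions_py : List Int × List Int := ([3, 1], [2, 5])

def Spec_match_positions_py (start_list : List Int) (end_list : List Int) (out : List (Int × Int)) : Prop := out = match_positions_py_alt start_list end_list
instance (start_list : List Int) (end_list : List Int) (out : List (Int × Int)) : Decidable (Spec_match_positions_py start_list end_list out) := by unfold Spec_match_positions_py; infer_instance

-- ===== CLAIM (what is proved, stated in full; the proofs are below) =====
def Claim_equal_match_positions_py : Prop := ∀ (start_list : List Int) (end_list : List Int), Dom_match_positions_py start_list end_list → Pre_match_positions_py start_list end_list → Spec_match_positions_py start_list end_list (match_positions_py start_list end_list)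


-- ===== LEMMAS AND PROOFS =====

theorem length_prefMaxB (l : List Int) (b : Option Int) : (prefMaxB l b).length = l.length := by
  induction l generalizing b with
  | nil => rfl
  | cons e rest ih => simp [prefMaxB, ih]

-- value of the accumulator update step of prefMaxB
def pmStep (b : Option Int) (e : Int) : Int :=
  match b with
  | none => e
  | some bb => if e > bb then e else bb

theorem prefMaxB_cons (e : Int) (rest : List Int) (b : Option Int) :
    prefMaxB (e :: rest) b = pmStep b e :: prefMaxB rest (some (pmStep b e)) := by
  cases b <;> rfl

theorem lt_pmStep_iff (s e : Int) (b : Option Int) :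
    s < pmStep b e ↔ (∃ x, b = some x ∧ s < x) ∨ s < e := by
  cases b with
  | none => simp [pmStep]
  | some bb => simp only [pmStep]; split_ifs with hc <;> simp <;> omega

-- s is below the i-th prefix maximum iff it is below the accumulator or some earlier element
theorem prefMaxB_lt_iff (s : Int) :
    ∀ (l : List Int) (b : Option Int) (i : Nat), i < l.length →
      (s < (prefMaxB l b).getD i 0 ↔
        (∃ x, b = some x ∧ s < x) ∨ ∃ j, j ≤ i ∧ s < l.getD j 0) := by
  intro l
  induction l with
  | nil => intro b i hi; simp at hi
  | cons e rest ih =>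
    intro b i hi
    rw [prefMaxB_cons]
    cases i with
    | zero =>
      simp only [List.getD_cons_zero, lt_pmStep_iff]
      constructor
      · rintro (h | h)
        · exact Or.inl h
        · exact Or.inr ⟨0, le_refl 0, h⟩
      · rintro (h | ⟨j, hj, hsj⟩)
        · exact Or.inl h
        · interval_cases j
          exact Or.inr (by simpa using hsj)
    | succ i' =>
      simp only [List.getD_cons_succ]
      simp only [List.length_cons] at hi
      rw [ih (some _) i' (by omega)]
      constructor
      · rintro (⟨x, hx, hsx⟩ | ⟨j, hj, hsj⟩)
        · cases hx
          rcases (lt_pmStep_iff s e b).mp hsx with h | h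
          · exact Or.inl h
          · exact Or.inr ⟨0, by omega, by simpa using h⟩
        · exact Or.inr ⟨j + 1, by omega, by simpa using hsj⟩
      · rintro (h | ⟨j, hj, hsj⟩)
        · exact Or.inl ⟨_, rfl, (lt_pmStep_iff s e b).mpr (Or.inl h)⟩
        · cases j with
          | zero =>
            exact Or.inl ⟨_, rfl, (lt_pmStep_iff s e b).mpr (Or.inr (by simpa using hsj))⟩
          | succ j' =>
            exact Or.inr ⟨j', by omega, by simpa using hsj⟩

-- binary search on a list whose "s < ·" predicate is upward closed returns the boundary
theorem bisectGo_spec (pm : List Int) (s : Int)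
    (mono : ∀ i j, i ≤ j → j < pm.length → s < pm.getD i 0 → s < pm.getD j 0) :
    ∀ (fuel lo hi : Nat), hi - lo ≤ fuel → lo ≤ hi → hi ≤ pm.length →
      (∀ i, i < lo → ¬ s < pm.getD i 0) →
      (∀ i, hi ≤ i → i < pm.length → s < pm.getD i 0) →
      (∀ i, i < bisectGo pm s fuel lo hi → ¬ s < pm.getD i 0) ∧
      (∀ i, bisectGo pm s fuel lo hi ≤ i → i < pm.length → s < pm.getD i 0) ∧
      bisectGo pm s fuel lo hi ≤ pm.length := by
  intro fuel
  induction fuel with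
  | zero =>
    intro lo hi hn hlohi hhi hbelow habove
    have : lo = hi := by omega
    subst this
    simp only [bisectGo]
    exact ⟨hbelow, fun i h1 h2 => habove i h1 h2, by omega⟩
  | succ n ih =>
    intro lo hi hn hlohi hhi hbelow habove
    rw [bisectGo]
    by_cases h : lo < hi
    · simp only [h, if_pos]
      by_cases hc : s < pm.getD ((lo + hi) / 2) 0
      · simp only [hc, if_pos]
        exact ih lo ((lo + hi) / 2) (by omega) (by omega) (by omega)
          hbelow (fun i h1 h2 => mono _ _ h1 h2 hc)
      · simp only [hc, if_neg, not_false_iff]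
        exact ih ((lo + hi) / 2 + 1) hi (by omega) (by omega) hhi
          (fun i hilt => by
            by_cases hio : i ≤ (lo + hi) / 2
            · intro hsi; exact hc (mono i ((lo + hi) / 2) hio (by omega) hsi)
            · omega)
          habove
    · simp only [h, if_neg, not_false_iff]
      exact ⟨hbelow, fun i h1 h2 => habove i (by omega) h2, by omega⟩

theorem bisectB_spec (pm : List Int) (s : Int)
    (mono : ∀ i j, i ≤ j → j < pm.length → s < pm.getD i 0 → s < pm.getD j 0)
    (lo hi : Nat) (hlohi : lo ≤ hi) (hhi : hi ≤ pm.length)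
    (hbelow : ∀ i, i < lo → ¬ s < pm.getD i 0)
    (habove : ∀ i, hi ≤ i → i < pm.length → s < pm.getD i 0) :
      (∀ i, i < bisectB pm s lo hi → ¬ s < pm.getD i 0) ∧
      (∀ i, bisectB pm s lo hi ≤ i → i < pm.length → s < pm.getD i 0) ∧
      bisectB pm s lo hi ≤ pm.length :=
  bisectGo_spec pm s mono (hi - lo) lo hi (le_refl _) hlohi hhi hbelow habove

-- A's inner loop when the first matching index is k
theorem innerLoopA_of_first (s : Int) :
    ∀ (l : List Int) (r : PySem.Dict Int Int) (k : Nat), k < l.length →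
      (∀ j, j < k → ¬ s < l.getD j 0) → s < l.getD k 0 →
      innerLoopA s l r = r.insert s (l.getD k 0) := by
  intro l
  induction l with
  | nil => intro r k hk; simp at hk
  | cons e rest ih =>
    intro r k hk hfirst hsk
    cases k with
    | zero => simp only [List.getD_cons_zero] at hsk; simp [innerLoopA, hsk]
    | succ k' =>
      have h0 : ¬ s < e := by simpa using hfirst 0 (by omega)
      simp only [List.getD_cons_succ] at hsk
      simp only [innerLoopA, if_neg h0]
      exact ih r k' (by simpa using hk) (fun j hj => by simpa using hfirst (j + 1) (by omega)) hsk

-- A's inner loop when no element matches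
theorem innerLoopA_of_none (s : Int) :
    ∀ (l : List Int) (r : PySem.Dict Int Int),
      (∀ j, j < l.length → ¬ s < l.getD j 0) → innerLoopA s l r = r := by
  intro l
  induction l with
  | nil => intro r _; rfl
  | cons e rest ih =>
    intro r h
    have h0 : ¬ s < e := by simpa using h 0 (by simp)
    simp only [innerLoopA, if_neg h0]
    exact ih r (fun j hj => by simpa using h (j + 1) (by simp; omega))

-- per-start bodies of A and B agree
theorem body_eq (end_list : List Int) (s : Int) (r : PySem.Dict Int Int) :
    (if bisectB (prefMaxB end_list none) s 0 (prefMaxB end_list none).length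
          < (prefMaxB end_list none).length
     then r.insert s (end_list.getD (bisectB (prefMaxB end_list none) s 0 (prefMaxB end_list none).length) 0)
     else r) = innerLoopA s end_list r := by
  set pm := prefMaxB end_list none with hpm
  have hlen : pm.length = end_list.length := length_prefMaxB end_list none
  have hiff : ∀ i, i < pm.length →
      (s < pm.getD i 0 ↔ ∃ j, j ≤ i ∧ s < end_list.getD j 0) := by
    intro i hi
    rw [hpm, prefMaxB_lt_iff s end_list none i (by omega)]
    simp
  have mono : ∀ i j, i ≤ j → j < pm.length → s < pm.getD i 0 → s < pm.getD j 0 := by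
    intro i j hij hj hsi
    rw [hiff j hj]
    rcases (hiff i (by omega)).mp hsi with ⟨k, hk, hsk⟩
    exact ⟨k, by omega, hsk⟩
  obtain ⟨hbelow, habove, hle⟩ :=
    bisectB_spec pm s mono 0 pm.length (by omega) (le_refl _)
      (fun i h1 => by omega) (fun i h1 h2 => by omega)
  set lo := bisectB pm s 0 pm.length with hlo
  by_cases hcase : lo < pm.length
  · rw [if_pos hcase]
    have hplo : s < pm.getD lo 0 := habove lo (le_refl _) hcase
    rcases (hiff lo hcase).mp hplo with ⟨k, hk, hsk⟩
    have hfirst : ∀ j, j < lo → ¬ s < end_list.getD j 0 := by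
      intro j hj hsj
      exact hbelow j hj ((hiff j (by omega)).mpr ⟨j, le_refl j, hsj⟩)
    have hklo : k = lo := by
      by_contra hne
      exact hfirst k (by omega) hsk
    subst hklo
    exact (innerLoopA_of_first s end_list r lo (by omega) hfirst hsk).symm
  · rw [if_neg hcase]
    have hnone : ∀ j, j < end_list.length → ¬ s < end_list.getD j 0 := by
      intro j hj hsj
      exact hbelow j (by omega) ((hiff j (by omega)).mpr ⟨j, le_refl j, hsj⟩)
    exact (innerLoopA_of_none s end_list r hnone).symm

-- A's general branch equals B on every input
theorem general_eq (start_list end_list : List Int) :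
    (start_list.foldl (fun r s => innerLoopA s end_list r)
      (PySem.Dict.empty : PySem.Dict Int Int)).items
      = match_positions_py_alt start_list end_list := by
  unfold match_positions_py_alt
  simp only
  congr 1
  generalize (PySem.Dict.empty : PySem.Dict Int Int) = d
  induction start_list generalizing d with
  | nil => rfl
  | cons s rest ih =>
    simp only [List.foldl_cons]
    rw [ih, ← body_eq]

-- first element of the filtered list is the element at the first matching index
theorem pyGet_filter_of_first (s : Int) :
    ∀ (l : List Int) (k : Nat), k < l.length →
      (∀ j, j < k → ¬ s < l.getD j 0) → s < l.getD k 0 →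
      PySem.List.pyGet? (l.filter (fun x => decide (s < x))) 0 = some (l.getD k 0) := by
  intro l
  induction l with
  | nil => intro k hk; simp at hk
  | cons e rest ih =>
    intro k hk hfirst hsk
    by_cases he : s < e
    · have hk0 : k = 0 := by
        by_contra hne
        exact hfirst 0 (by omega) (by simpa using he)
      subst hk0
      simp [he, PySem.List.pyGet?, PySem.List.pyIdx?]
    · have hk0 : k ≠ 0 := by
        intro h; subst h; simp only [List.getD_cons_zero] at hsk; exact he hsk
      obtain ⟨k', rfl⟩ : ∃ k', k = k' + 1 := ⟨k - 1, by omega⟩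
      simp only [List.getD_cons_succ] at hsk ⊢
      rw [List.filter_cons_of_neg (by simpa using he)]
      exact ih k' (by simpa using hk)
        (fun j hj => by simpa using hfirst (j + 1) (by omega)) hsk

-- ===== VERDICT (by name: the statement is the Claim_ definition above) =====
theorem match_positions_py_spec : Claim_equal_match_positions_py := by
  intro start_list end_list _dom hpre
  unfold Spec_match_positions_py
  unfold match_positions_py
  by_cases h1 : start_list.length = 1
  · rw [if_pos h1]
    obtain ⟨v, rfl⟩ := List.length_eq_one_iff.mp h1
    have hex : ∃ x ∈ end_list, decide (v < x) = true := by
      simpa [List.any_eq_true] using hpre h1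
    have hklen : end_list.findIdx (fun x => decide (v < x)) < end_list.length :=
      List.findIdx_lt_length_of_exists hex
    have hks : v < end_list.getD (end_list.findIdx (fun x => decide (v < x))) 0 := by
      have := List.findIdx_getElem (p := fun x => decide (v < x)) (xs := end_list) (w := hklen)
      rw [List.getD_eq_getElem end_list 0 hklen]
      simpa using this
    have hfirst : ∀ j, j < end_list.findIdx (fun x => decide (v < x)) →
        ¬ v < end_list.getD j 0 := by
      intro j hj
      rw [List.getD_eq_getElem end_list 0 (by omega)]
      have := List.not_of_lt_findIdx (p := fun x => decide (v < x)) (xs := end_list) hj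
      simpa using this
    rw [← general_eq [v] end_list]
    simp only [List.foldl_cons, List.foldl_nil, List.getD_cons_zero]
    rw [innerLoopA_of_first v end_list PySem.Dict.empty
        (end_list.findIdx (fun x => decide (v < x))) hklen hfirst hks]
    rw [pyGet_filter_of_first v end_list (end_list.findIdx (fun x => decide (v < x)))
        hklen hfirst hks]
  · rw [if_neg h1]
    exact general_eq start_list end_list
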